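-- pv_equiv track=rewrite | github.com/paulklemstine/factor | lean/books/TRIANGLESWALLOWEDUNIVERSE9/book/convert_md_to_latex.py | safe_caption
-- ===== SOURCE A (Python) =====
-- DOLLAR = '$'
--
-- def safe_caption(text, max_len=200):
--     """Truncate a caption safely without breaking LaTeX commands or math mode."""
--     if len(text) <= max_len:
--         return text
--     depth_brace = 0
--     depth_math = 0
--     last_safe = 0
--     i = 0
--     while i < len(text) and i < max_len:
--         ch = text[i]
--         if ch == '{':
--             depth_brace += 1
--         elif ch == '}':
--             depth_brace -= 1
--         elif ch == DOLLAR: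
--             depth_math = 1 - depth_math
--         if depth_brace == 0 and depth_math == 0:
--             if ch in (' ', ',', '.', ';'):
--                 last_safe = i
--         i += 1
--     if last_safe > 50:
--         return text[:last_safe] + '\\ldots'
--     return text[:max_len]
-- ===== SOURCE B (Python) =====
-- def safe_caption(text, max_len=200):
--     """Truncate a caption safely without breaking LaTeX commands or math mode."""
--     if len(text) <= max_len:
--         return text
--     # cumulative tables: bal[k]/par[k] reflect the prefix of length k
--     bal = [0]
--     par = [0]
--     for i in range(min(len(text), max_len)):
--         ch = text[i]
--         bal.append(bal[-1] + (ch == '{') - (ch == '}'))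
--         par.append((par[-1] + (ch == '$')) % 2)
--     # backward scan: the largest safe index, default 0
--     last_safe = 0
--     for i in range(len(bal) - 2, -1, -1):
--         if bal[i + 1] == 0 and par[i + 1] == 0 and text[i] in ' ,.;':
--             last_safe = i
--             break
--     if last_safe > 50:
--         return text[:last_safe] + '\\ldots'
--     return text[:max_len]
-- ===== Notes on version B (the rewrite author's own statement) =====
-- stated objective: alternative
-- what changed: A's single forward scan with mutable running state (brace depth, math parity, last_safe) is replaced by building two cumulative tables (brace balance and $-parity per prefix) and then scanning backward from the top for the first, i.e. largest, safe break index.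
import Mathlib
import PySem

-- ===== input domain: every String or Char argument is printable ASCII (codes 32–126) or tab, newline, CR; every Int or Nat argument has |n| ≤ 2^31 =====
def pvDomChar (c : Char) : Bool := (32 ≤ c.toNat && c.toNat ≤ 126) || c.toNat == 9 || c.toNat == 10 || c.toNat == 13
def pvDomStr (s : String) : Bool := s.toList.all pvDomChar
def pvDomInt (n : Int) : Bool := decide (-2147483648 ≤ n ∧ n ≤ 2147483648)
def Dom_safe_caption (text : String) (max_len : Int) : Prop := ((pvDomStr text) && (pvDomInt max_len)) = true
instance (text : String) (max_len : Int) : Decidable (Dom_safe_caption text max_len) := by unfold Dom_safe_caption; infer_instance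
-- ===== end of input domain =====

-- B replaces A's single stateful forward scan by two cumulative tables (brace balance, '$'-parity)
-- plus a backward scan for the largest safe break index (objective: alternative decomposition, same cost).

-- ===== PORT A =====
-- the while loop of A: state (depth_brace, depth_math, last_safe), index i
def safeLoopA (cs : List Char) (maxLen : Int) (i : Nat) (db dm : Int) (ls : Nat) : Nat :=
  if h : i < cs.length ∧ (i : Int) < maxLen then
    let ch := cs[i]
    let db' := if ch = '{' then db + 1 else if ch = '}' then db - 1 else db
    let dm' := if ch = '{' then dm else if ch = '}' then dm else if ch = '$' then 1 - dm else dm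
    let ls' := if db' = 0 ∧ dm' = 0 ∧ (ch = ' ' ∨ ch = ',' ∨ ch = '.' ∨ ch = ';') then i else ls
    safeLoopA cs maxLen (i + 1) db' dm' ls'
  else ls
termination_by cs.length - i

def safe_caption (text : String) (max_len : Int) : String :=
  let cs := text.toList
  if (PySem.Str.len text) ≤ max_len then text
  else
    let last_safe := safeLoopA cs max_len 0 0 0 0
    if (last_safe : Int) > 50 then
      String.ofList (PySem.List.slice cs none (some (last_safe : Int)) ++ "\\ldots".toList)
    else
      String.ofList (PySem.List.slice cs none (some max_len))

-- ===== PORT B =====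
-- B's first loop: build the cumulative tables bal, par (value at index k reflects the prefix of length k)
def tablesB (cs : List Char) (n : Int) : List Int × List Int :=
  (PySem.List.pyRange 0 n 1).foldl
    (fun (st : List Int × List Int) i =>
      let ch := PySem.List.pyGetD cs i ' '
      (st.1 ++ [PySem.List.pyGetD st.1 (-1) 0 + (if ch = '{' then 1 else 0) - (if ch = '}' then 1 else 0)],
       st.2 ++ [PySem.Int.mod (PySem.List.pyGetD st.2 (-1) 0 + (if ch = '$' then 1 else 0)) 2]))
    ([0], [0])

-- B's backward scan with break: the first (i.e. largest) safe index from the top, default 0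
def scanB (cs : List Char) (bal par : List Int) (i : Int) : Int :=
  if h : 0 ≤ i then
    if PySem.List.pyGetD bal (i + 1) 0 = 0 ∧ PySem.List.pyGetD par (i + 1) 0 = 0 ∧
        PySem.List.pyGetD cs i ' ' ∈ [' ', ',', '.', ';'] then i
    else scanB cs bal par (i - 1)
  else 0
termination_by (i + 1).toNat
decreasing_by omega

def safe_caption_alt (text : String) (max_len : Int) : String :=
  let cs := text.toList
  if (PySem.Str.len text) ≤ max_len then text
  else
    let t := tablesB cs (min (cs.length : Int) max_len)
    let last_safe := scanB cs t.1 t.2 ((t.1.length : Int) - 2)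
    if last_safe > 50 then
      String.ofList (PySem.List.slice cs none (some last_safe) ++ "\\ldots".toList)
    else
      String.ofList (PySem.List.slice cs none (some max_len))

-- ===== PRECONDITION & SPEC =====
def Spec_safe_caption (text : String) (max_len : Int) (out : String) : Prop := out = safe_caption_alt text max_len
instance (text : String) (max_len : Int) (out : String) : Decidable (Spec_safe_caption text max_len out) := by unfold Spec_safe_caption; infer_instance

-- ===== CLAIM (what is proved, stated in full; the proofs are below) =====
def Claim_equal_safe_caption : Prop := ∀ (text : String) (max_len : Int), Dom_safe_caption text max_len → Spec_safe_caption text max_len (safe_caption text max_len)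

-- ===== LEMMAS AND PROOFS =====

-- brace balance / '$'-parity of the prefix of length k
def balAt (cs : List Char) (k : Nat) : Int :=
  ((cs.take k).map (fun ch => if ch = '{' then (1 : Int) else if ch = '}' then -1 else 0)).sum
def parAt (cs : List Char) (k : Nat) : Int :=
  ((cs.take k).map (fun ch => if ch = '$' then (1 : Int) else 0)).sum % 2

-- "index i is a safe break point"
def Pb (cs : List Char) (i : Nat) : Bool :=
  balAt cs (i + 1) = 0 ∧ parAt cs (i + 1) = 0 ∧
    (cs.getD i ' ' = ' ' ∨ cs.getD i ' ' = ',' ∨ cs.getD i ' ' = '.' ∨ cs.getD i ' ' = ';')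

-- the common value: last index in [0, n) satisfying Pb, default 0
def lastSafe (cs : List Char) (n : Nat) : Nat :=
  (List.range n).foldl (fun ls j => if Pb cs j then j else ls) 0

-- step lemmas: how balAt / parAt advance by one character
lemma balAt_zero (cs : List Char) : balAt cs 0 = 0 := by simp [balAt]

lemma parAt_zero (cs : List Char) : parAt cs 0 = 0 := by simp [parAt]

lemma balAt_succ (cs : List Char) (i : Nat) (h : i < cs.length) :
    balAt cs (i + 1) = balAt cs i + (if cs[i] = '{' then 1 else if cs[i] = '}' then -1 else 0) := by
  unfold balAt
  rw [List.map_take, List.map_take, List.sum_take_succ _ i (by simp [h])]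
  simp

lemma parAt_succ (cs : List Char) (i : Nat) (h : i < cs.length) :
    parAt cs (i + 1) = (parAt cs i + (if cs[i] = '$' then 1 else 0)) % 2 := by
  unfold parAt
  rw [List.map_take, List.map_take, List.sum_take_succ _ i (by simp [h])]
  simp only [List.getElem_map]
  split_ifs <;> omega

lemma parAt_mem (cs : List Char) (i : Nat) : parAt cs i = 0 ∨ parAt cs i = 1 := by
  unfold parAt; omega

-- while-loop condition of A, as a bound on i
lemma condA_iff (cs : List Char) (maxLen : Int) (i : Nat) :
    (i < cs.length ∧ (i : Int) < maxLen) ↔ i < min cs.length maxLen.toNat := by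
  omega

-- A's loop computes the forward "last safe index" fold
lemma loopA_eq (cs : List Char) (maxLen : Int) :
    ∀ (k i : Nat) (ls : Nat), i + k = min cs.length maxLen.toNat →
      safeLoopA cs maxLen i (balAt cs i) (parAt cs i) ls =
        (List.range' i k).foldl (fun ls j => if Pb cs j then j else ls) ls := by
  intro k
  induction k with
  | zero =>
    intro i ls hik
    rw [safeLoopA]
    rw [dif_neg]
    · simp
    · rw [condA_iff]; omega
  | succ k ih =>
    intro i ls hik
    have hi : i < min cs.length maxLen.toNat := by omega
    have hlen : i < cs.length := by omega
    rw [safeLoopA, dif_pos ((condA_iff cs maxLen i).mpr hi)]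
    simp only
    rw [List.range'_succ, List.foldl_cons]
    have hbal : (if cs[i] = '{' then balAt cs i + 1 else if cs[i] = '}' then balAt cs i - 1 else balAt cs i)
        = balAt cs (i + 1) := by
      rw [balAt_succ cs i hlen]; split_ifs <;> ring
    have hpar : (if cs[i] = '{' then parAt cs i else if cs[i] = '}' then parAt cs i
          else if cs[i] = '$' then 1 - parAt cs i else parAt cs i) = parAt cs (i + 1) := by
      rw [parAt_succ cs i hlen]
      rcases parAt_mem cs i with h0 | h0 <;> split_ifs <;> simp_all
    rw [hbal, hpar]
    have hP : (balAt cs (i + 1) = 0 ∧ parAt cs (i + 1) = 0 ∧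
          (cs[i] = ' ' ∨ cs[i] = ',' ∨ cs[i] = '.' ∨ cs[i] = ';')) ↔ Pb cs i = true := by
      simp [Pb, List.getD_eq_getElem?_getD, hlen]
    by_cases hp : Pb cs i = true
    · rw [if_pos (hP.mpr hp), if_pos hp]
      exact ih (i + 1) i (by omega)
    · rw [if_neg (fun hc => hp (hP.mp hc)), if_neg hp]
      exact ih (i + 1) ls (by omega)

-- B's table loop builds the cumulative maps of balAt / parAt
lemma bal_step' (cs : List Char) (i : Nat) (h : i < cs.length) :
    balAt cs i + (if cs[i] = '{' then (1:Int) else 0) - (if cs[i] = '}' then (1:Int) else 0)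
      = balAt cs (i + 1) := by
  rw [balAt_succ cs i h]
  split_ifs <;> simp_all <;> ring

lemma par_step' (cs : List Char) (i : Nat) (h : i < cs.length) :
    PySem.Int.mod (parAt cs i + (if cs[i] = '$' then (1:Int) else 0)) 2 = parAt cs (i + 1) := by
  rw [parAt_succ cs i h, PySem.Int.mod_eq_emod_of_pos (by norm_num)]

lemma tables_eq (cs : List Char) :
    ∀ (n : Nat), n ≤ cs.length →
      tablesB cs (n : Int) =
        ((List.range (n + 1)).map (balAt cs), (List.range (n + 1)).map (parAt cs)) := by
  intro n
  induction n with
  | zero => intro _; simp [tablesB, PySem.List.pyRange_one_eq_nil, balAt_zero, parAt_zero]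
  | succ n ih =>
    intro hn
    have hn' : n ≤ cs.length := by omega
    have hsplit : ((n : Int) + 1) = ((n + 1 : Nat) : Int) := by push_cast; ring
    unfold tablesB at ih ⊢
    rw [← hsplit, PySem.List.pyRange_one_succ_right (by positivity), List.foldl_append,
      ih hn']
    simp only [List.foldl_cons, List.foldl_nil]
    have hrange : List.range (n + 1) = List.range n ++ [n] := List.range_succ
    rw [hrange]
    simp only [List.map_append, List.map_cons, List.map_nil,
      PySem.List.pyGetD_neg_one_append_singleton]
    have hch : PySem.List.pyGetD cs (n : Int) ' ' = cs[n] := by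
      rw [PySem.List.pyGetD_natCast]
      exact List.getD_eq_getElem _ _ hn
    rw [hch, bal_step' cs n hn, par_step' cs n hn]
    simp [List.range_succ]

-- B's backward scan from k-1 equals the forward "last safe index" fold over [0, k)
lemma scan_eq (cs : List Char) (N : Nat) (hN : N ≤ cs.length) :
    ∀ (k : Nat), k ≤ N →
      scanB cs ((List.range (N + 1)).map (balAt cs)) ((List.range (N + 1)).map (parAt cs))
          ((k : Int) - 1) = ((lastSafe cs k : Nat) : Int) := by
  intro k
  induction k with
  | zero =>
    intro _
    rw [scanB, dif_neg (by omega)]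
    simp [lastSafe]
  | succ k ih =>
    intro hk
    have hk' : k ≤ N := by omega
    have hkl : k < cs.length := by omega
    have hc : ((k + 1 : Nat) : Int) - 1 = (k : Int) := by push_cast; ring
    rw [hc, scanB, dif_pos (by positivity)]
    have hbal : PySem.List.pyGetD ((List.range (N + 1)).map (balAt cs)) ((k : Int) + 1) 0
        = balAt cs (k + 1) := by
      have : ((k : Int) + 1) = ((k + 1 : Nat) : Int) := by push_cast; ring
      rw [this, PySem.List.pyGetD_natCast]
      rw [List.getD_eq_getElem _ _ (by simp; omega)]
      simp
    have hpar : PySem.List.pyGetD ((List.range (N + 1)).map (parAt cs)) ((k : Int) + 1) 0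
        = parAt cs (k + 1) := by
      have : ((k : Int) + 1) = ((k + 1 : Nat) : Int) := by push_cast; ring
      rw [this, PySem.List.pyGetD_natCast]
      rw [List.getD_eq_getElem _ _ (by simp; omega)]
      simp
    have hch : PySem.List.pyGetD cs (k : Int) ' ' = cs[k] := by
      rw [PySem.List.pyGetD_natCast]
      exact List.getD_eq_getElem _ _ hkl
    rw [hbal, hpar, hch]
    have hlast : lastSafe cs (k + 1) = if Pb cs k then k else lastSafe cs k := by
      unfold lastSafe
      rw [List.range_succ, List.foldl_append]
      simp
    have hPb : (balAt cs (k + 1) = 0 ∧ parAt cs (k + 1) = 0 ∧ cs[k] ∈ [' ', ',', '.', ';'])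
        ↔ Pb cs k = true := by
      simp [Pb, List.getD_eq_getElem?_getD, hkl]
    by_cases hp : Pb cs k = true
    · rw [if_pos (hPb.mpr hp), hlast, if_pos hp]
    · rw [if_neg (fun hc' => hp (hPb.mp hc')), hlast, if_neg hp]
      have : (k : Int) - 1 = ((k : Nat) : Int) - 1 := by norm_num
      rw [this]
      exact ih hk'

theorem safe_caption_spec : Claim_equal_safe_caption := by
  intro text max_len _
  unfold Spec_safe_caption safe_caption safe_caption_alt
  simp only [PySem.Str.len_eq]
  by_cases hle : ((text.toList.length : Int)) ≤ max_len
  · rw [if_pos hle, if_pos hle]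
  · rw [if_neg hle, if_neg hle]
    by_cases hm : max_len < 0
    · -- no iterations at all: both last_safe values are 0
      have hA : safeLoopA text.toList max_len 0 0 0 0 = 0 := by
        rw [safeLoopA, dif_neg (by push_cast; omega)]
      have hmin : min ((text.toList.length : Int)) max_len = max_len := by omega
      have hB : tablesB text.toList max_len = ([0], [0]) := by
        unfold tablesB
        rw [PySem.List.pyRange_one_eq_nil (by omega)]
        rfl
      rw [hA, hmin, hB]
      simp only [List.length_cons, List.length_nil]
      rw [scanB, dif_neg (by norm_num)]
      norm_num
    · -- 0 ≤ max_len < len text: both sides compute lastSafe over the first max_len chars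
      have hm' : (0:Int) ≤ max_len := by omega
      obtain ⟨N, rfl⟩ : ∃ N : Nat, max_len = (N : Int) := ⟨max_len.toNat, by omega⟩
      have hNl : N ≤ text.toList.length := by omega
      have hA : safeLoopA text.toList (N : Int) 0 0 0 0 = lastSafe text.toList N := by
        have h0 := loopA_eq text.toList (N : Int) N 0 0 (by omega)
        rw [balAt_zero, parAt_zero] at h0
        rw [h0, lastSafe, List.range_eq_range']
      have hmin : min ((text.toList.length : Int)) (N : Int) = (N : Int) := by omega
      rw [hmin, tables_eq text.toList N hNl, hA]
      simp only [List.length_map, List.length_range]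
      have hidx : (((N + 1 : Nat) : Int)) - 2 = ((N : Int)) - 1 := by push_cast; ring
      rw [hidx, scan_eq text.toList N hNl N le_rfl]
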